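-- pv_equiv track=rewrite | github.com/joaquinmartirena/vms-driver | driver/ntcip_driver.py | _decode_supported_tags_bitmask
-- ===== SOURCE A (Python) =====
-- def _decode_supported_tags_bitmask(bitmask: int) -> set[str]:
--     """Decodifica el bitmask NTCIP 1203 v03 de dmsSupportedMultiTags."""
--     BIT_TAG_MAP = {
--         0:  "cb",   # color background
--         1:  "cf",   # color foreground
--         2:  "fl",   # flashing
--         3:  "fo",   # font
--         4:  "g",    # graphic
--         5:  "hc",   # hex char
--         6:  "jl",   # justification line
--         7:  "jp",   # justification page
--         8:  "ms",   # manufacturer specific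
--         9:  "mv",   # moving text
--         10: "nl",   # new line
--         11: "np",   # new page
--         12: "pt",   # page time
--         13: "sc",   # spacing char
--         14: "f",    # dynamic field
--         15: "pb",   # page background
--         16: "sr",   # speed range
--         17: "tr",   # text rectangle
--         18: "cr",   # color rectangle
--         19: "sl",   # line spacing
--     }
--     return {tag for bit, tag in BIT_TAG_MAP.items() if bitmask & (1 << bit)}
-- ===== SOURCE B (Python) =====
-- def _decode_supported_tags_bitmask(bitmask: int) -> set[str]:
--     """Decodifica el bitmask NTCIP 1203 v03 de dmsSupportedMultiTags."""
--     MASK_TAG_MAP = {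
--         0x00001: "cb",
--         0x00002: "cf",
--         0x00004: "fl",
--         0x00008: "fo",
--         0x00010: "g",
--         0x00020: "hc",
--         0x00040: "jl",
--         0x00080: "jp",
--         0x00100: "ms",
--         0x00200: "mv",
--         0x00400: "nl",
--         0x00800: "np",
--         0x01000: "pt",
--         0x02000: "sc",
--         0x04000: "f",
--         0x08000: "pb",
--         0x10000: "sr",
--         0x20000: "tr",
--         0x40000: "cr",
--         0x80000: "sl",
--     }
--     tags = set()
--     masked = bitmask & 0xFFFFF
--     while masked:
--         low = masked & -masked          # isolate the lowest set bit
--         tags.add(MASK_TAG_MAP[low])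
--         masked -= low                   # clear it
--     return tags
-- ===== Notes on version B (the rewrite author's own statement) =====
-- stated objective: alternative
-- what changed: Instead of scanning every entry of the bit->tag table and AND-ing the bitmask with each shifted mask, B masks once to the twenty valid bits and then loops only over the set bits of the result (isolating the lowest set bit with masked & -masked and clearing it), looking each power-of-two mask up in a mask-keyed dict.
import Mathlib
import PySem

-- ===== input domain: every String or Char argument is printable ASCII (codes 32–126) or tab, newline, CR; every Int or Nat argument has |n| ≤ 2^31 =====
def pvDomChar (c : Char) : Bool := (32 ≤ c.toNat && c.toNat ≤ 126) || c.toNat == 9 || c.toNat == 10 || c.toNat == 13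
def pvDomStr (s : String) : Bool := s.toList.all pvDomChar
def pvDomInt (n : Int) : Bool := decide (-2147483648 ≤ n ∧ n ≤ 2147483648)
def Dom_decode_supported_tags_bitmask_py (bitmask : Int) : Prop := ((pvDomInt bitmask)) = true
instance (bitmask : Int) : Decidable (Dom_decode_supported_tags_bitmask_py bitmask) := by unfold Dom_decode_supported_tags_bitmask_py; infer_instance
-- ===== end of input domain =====

-- B replaces A's scan of all 20 table entries (one bitmask & (1<<bit) test per entry) by a loop
-- over only the set bits of bitmask & 0xFFFFF, isolating the lowest set bit each round and
-- looking it up in a mask-keyed dict (objective: alternative algorithm, same exact result).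

-- ===== PORT A =====
-- items of A's dict literal BIT_TAG_MAP (bit index -> tag), in insertion order
def pvBitTagMap : List (Int × String) :=
  [(0, "cb"), (1, "cf"), (2, "fl"), (3, "fo"), (4, "g"), (5, "hc"), (6, "jl"), (7, "jp"),
   (8, "ms"), (9, "mv"), (10, "nl"), (11, "np"), (12, "pt"), (13, "sc"), (14, "f"), (15, "pb"),
   (16, "sr"), (17, "tr"), (18, "cr"), (19, "sl")]

-- {tag for bit, tag in BIT_TAG_MAP.items() if bitmask & (1 << bit)}
-- (every key of the literal dict is nonnegative, so `.toNat` on the shift amount is exact)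
def decode_supported_tags_bitmask_py (bitmask : Int) : List String :=
  pvBitTagMap.foldl
    (fun tags p => if PySem.Int.band bitmask ((1 : Int) <<< p.1.toNat) ≠ 0 then PySem.Set.add tags p.2 else tags)
    PySem.Set.empty

-- ===== PORT B =====
-- B's dict literal MASK_TAG_MAP (power-of-two mask -> tag), in insertion order
def pvMaskTagMap : PySem.Dict Int String :=
  PySem.Dict.ofList
    [(1, "cb"), (2, "cf"), (4, "fl"), (8, "fo"), (16, "g"), (32, "hc"), (64, "jl"), (128, "jp"),
     (256, "ms"), (512, "mv"), (1024, "nl"), (2048, "np"), (4096, "pt"), (8192, "sc"),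
     (16384, "f"), (32768, "pb"), (65536, "sr"), (131072, "tr"), (262144, "cr"), (524288, "sl")]

-- B's while loop; fuel = masked + 1 bounds the iteration count (masked strictly decreases).
-- The `none` arm is where Python would raise KeyError; it is never reached: every set bit of
-- masked (a value in [0, 2^20)) is one of the 20 dict keys.
def pvDecodeLoop : Nat → Int → PySem.Set String → PySem.Set String
  | 0, _, tags => tags
  | fuel + 1, masked, tags =>
    if masked ≠ 0 then
      let low := PySem.Int.band masked (-masked)
      match PySem.Dict.get? pvMaskTagMap low with
      | some t => pvDecodeLoop fuel (masked - low) (PySem.Set.add tags t)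
      | none => tags
    else tags

def decode_supported_tags_bitmask_py_alt (bitmask : Int) : List String :=
  pvDecodeLoop ((PySem.Int.band bitmask 1048575).toNat + 1) (PySem.Int.band bitmask 1048575) PySem.Set.empty

-- ===== PRECONDITION & SPEC =====
def Spec_decode_supported_tags_bitmask_py (bitmask : Int) (out : List String) : Prop := out = decode_supported_tags_bitmask_py_alt bitmask
instance (bitmask : Int) (out : List String) : Decidable (Spec_decode_supported_tags_bitmask_py bitmask out) := by unfold Spec_decode_supported_tags_bitmask_py; infer_instance

-- ===== CLAIM (what is proved, stated in full; the proofs are below) =====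
def Claim_equal_decode_supported_tags_bitmask_py : Prop := ∀ (bitmask : Int), Dom_decode_supported_tags_bitmask_py bitmask → Spec_decode_supported_tags_bitmask_py bitmask (decode_supported_tags_bitmask_py bitmask)

-- ===== LEMMAS AND PROOFS =====

-- the shared canonical form: fold A's table, keeping the entries whose bit P selects
def pvCanon (P : Int → Bool) (acc : PySem.Set String) : PySem.Set String :=
  pvBitTagMap.foldl (fun tags p => if P p.1 then PySem.Set.add tags p.2 else tags) acc

-- bitwise subtraction of a sub-mask: m - (m &&& n) clears exactly the bits of n
theorem pv_sub_and_testBit (j : Nat) : ∀ (m n : Nat), (m - (m &&& n)).testBit j = (m.testBit j && !n.testBit j) := by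
  induction j with
  | zero =>
    intro m n
    have h1 : (m &&& n) ≤ m := Nat.and_le_left
    have h := Nat.testBit_and m n 0
    simp only [Nat.testBit_zero] at h
    have h2 : ((m &&& n) % 2 = 1) ↔ ((m % 2 = 1) ∧ (n % 2 = 1)) := by
      simpa using congrArg (· = true) h
    simp only [Nat.testBit_zero]
    by_cases hm1 : m % 2 = 1 <;> by_cases hn1 : n % 2 = 1 <;> simp [hm1, hn1] <;> omega
  | succ j ih =>
    intro m n
    have h1 : (m &&& n) ≤ m := Nat.and_le_left
    have hd : (m &&& n) / 2 = (m / 2) &&& (n / 2) := Nat.and_div_two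
    have h := Nat.testBit_and m n 0
    simp only [Nat.testBit_zero] at h
    have h2 : ((m &&& n) % 2 = 1) ↔ ((m % 2 = 1) ∧ (n % 2 = 1)) := by
      simpa using congrArg (· = true) h
    have h4 : (m - (m &&& n)) / 2 = m / 2 - ((m / 2) &&& (n / 2)) := by
      rw [← hd]
      omega
    rw [Nat.testBit_add_one, Nat.testBit_add_one, Nat.testBit_add_one, h4, ih]

-- m &&& (m-1) = m with its lowest set bit cleared; the isolated bit m - (m &&& (m-1)) is a power of two
theorem pv_lowbit : ∀ (M : Nat), 0 < M →
    ∃ i, M - (M &&& (M - 1)) = 2 ^ i ∧ M.testBit i = true ∧ ∀ j, j < i → M.testBit j = false := by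
  intro M
  induction M using Nat.strong_induction_on with
  | _ M ih =>
    intro hM
    rcases Nat.even_or_odd M with he | ho
    · -- even: recurse on M/2
      have hme : M % 2 = 0 := Nat.even_iff.mp he
      have hM2 : 0 < M / 2 := by omega
      obtain ⟨i, hi1, hi2, hi3⟩ := ih (M / 2) (by omega) hM2
      have hand0 : (M &&& (M - 1)) % 2 = 0 := by
        have h := Nat.testBit_and M (M - 1) 0
        simp only [Nat.testBit_zero] at h
        have h2 : ((M &&& (M - 1)) % 2 = 1) ↔ ((M % 2 = 1) ∧ ((M - 1) % 2 = 1)) := by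
          simpa using congrArg (· = true) h
        omega
      have handdiv : (M &&& (M - 1)) / 2 = (M / 2) &&& (M / 2 - 1) := by
        rw [Nat.and_div_two]
        congr 1
        omega
      have hand : M &&& (M - 1) = 2 * ((M / 2) &&& (M / 2 - 1)) := by
        omega
      refine ⟨i + 1, ?_, ?_, ?_⟩
      · have hle : (M / 2) &&& (M / 2 - 1) ≤ M / 2 := Nat.and_le_left
        have : M - (M &&& (M - 1)) = 2 * (M / 2 - ((M / 2) &&& (M / 2 - 1))) := by omega
        rw [this, hi1, pow_succ]
        ring
      · rw [Nat.testBit_add_one]; exact hi2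
      · intro j hj
        cases j with
        | zero => simp [Nat.testBit_zero, hme]
        | succ k => rw [Nat.testBit_add_one]; exact hi3 k (by omega)
    · -- odd: the lowest bit is bit 0
      have hmo : M % 2 = 1 := Nat.odd_iff.mp ho
      have hand1 : M &&& 1 = 1 := by
        rw [Nat.and_one_is_mod, hmo]
      have hpred : M - 1 = M - (M &&& 1) := by rw [hand1]
      have hpredbit : ∀ j, (M - 1).testBit j = (M.testBit j && !(decide (0 = j))) := by
        intro j
        rw [hpred, pv_sub_and_testBit]
        congr 1
        have h1 : (1 : Nat) = 2 ^ 0 := rfl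
        rw [h1, Nat.testBit_two_pow]
      have handeq : M &&& (M - 1) = M - 1 := by
        apply Nat.eq_of_testBit_eq
        intro j
        rw [Nat.testBit_and, hpredbit]
        cases M.testBit j <;> simp
      refine ⟨0, ?_, ?_, ?_⟩
      · rw [handeq]; omega
      · simp [Nat.testBit_zero, hmo]
      · intro j hj; omega
-- (continued below)

-- PySem.Int.band with a negative left argument and nonnegative right argument, in Nat terms
theorem pv_band_neg_left (a : Int) (ha : a < 0) (b : Nat) :
    PySem.Int.band a (b : Int) = ((b - (b &&& (-a - 1).toNat) : Nat) : Int) := by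
  simp only [PySem.Int.band]
  rw [if_neg (by omega), if_pos (by omega)]
  simp

-- the masked value is a Nat below 2^20
theorem pv_masked_bounds (bm : Int) :
    0 ≤ PySem.Int.band bm 1048575 ∧ (PySem.Int.band bm 1048575).toNat < 2 ^ 20 := by
  by_cases h : 0 ≤ bm
  · rw [show (1048575 : Int) = ((1048575 : Nat) : Int) by norm_num,
      PySem.Int.band_of_nonneg h (by norm_num)]
    have : bm.toNat &&& 1048575 ≤ 1048575 := Nat.and_le_right
    constructor
    · positivity
    · simp only [Int.toNat_natCast]
      omega
  · have h' : bm < 0 := by omega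
    rw [show (1048575 : Int) = ((1048575 : Nat) : Int) by norm_num, pv_band_neg_left bm h']
    have : (1048575 : Nat) - (1048575 &&& (-bm - 1).toNat) ≤ 1048575 := by omega
    constructor
    · positivity
    · simp only [Int.toNat_natCast]
      omega

-- bit j of the masked value decides A's test  bitmask & (1 << j) != 0   (j < 20)
theorem pv_cond_iff (bm : Int) (j : Nat) (hj : j < 20) :
    (PySem.Int.band bm ((1 : Int) <<< (j : Int)) ≠ 0) ↔ (PySem.Int.band bm 1048575).toNat.testBit j = true := by
  have hK : (1048575 : Nat) = 2 ^ 20 - 1 := by norm_num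
  by_cases h : 0 ≤ bm
  · rw [Int.one_shiftLeft, PySem.Int.band_of_nonneg h (by positivity),
      show (1048575 : Int) = ((1048575 : Nat) : Int) by norm_num,
      PySem.Int.band_of_nonneg h (by norm_num)]
    simp only [Int.toNat_natCast]
    rw [Nat.and_two_pow]
    constructor
    · intro hne
      rw [Nat.testBit_and, hK, Nat.testBit_two_pow_sub_one]
      cases hb : bm.toNat.testBit j
      · rw [hb] at hne; simp at hne
      · simp [hj]
    · intro ht
      rw [Nat.testBit_and, hK, Nat.testBit_two_pow_sub_one] at ht
      simp only [Bool.and_eq_true, decide_eq_true_eq] at ht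
      rw [ht.1]
      simp
  · have h' : bm < 0 := by omega
    rw [Int.one_shiftLeft, pv_band_neg_left bm h',
      show (1048575 : Int) = ((1048575 : Nat) : Int) by norm_num, pv_band_neg_left bm h']
    simp only [Int.toNat_natCast]
    rw [hK, pv_sub_and_testBit, Nat.testBit_two_pow_sub_one]
    have h2 : 2 ^ j &&& (-bm - 1).toNat = 2 ^ j * ((-bm - 1).toNat.testBit j).toNat :=
      Nat.two_pow_and _ _
    constructor
    · intro hne
      cases hb : (-bm - 1).toNat.testBit j
      · simp [hj]
      · exfalso
        have h3 : 2 ^ j &&& (-bm - 1).toNat = 2 ^ j := by rw [h2, hb]; simp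
        rw [h3] at hne
        simp at hne
    · intro ht
      simp only [Bool.and_eq_true, Bool.not_eq_true', decide_eq_true_eq] at ht
      have h3 : 2 ^ j &&& (-bm - 1).toNat = 0 := by rw [h2, ht.2]; simp
      rw [h3]
      simp

-- the tag at index i of the table
def pvTag : Nat → String :=
  fun i => ["cb", "cf", "fl", "fo", "g", "hc", "jl", "jp", "ms", "mv", "nl", "np", "pt", "sc",
            "f", "pb", "sr", "tr", "cr", "sl"].getD i ""

theorem pv_row (i : Nat) (h : i < 20) :
    ((i : Int), pvTag i) ∈ pvBitTagMap ∧
      PySem.Dict.get? pvMaskTagMap (((2 ^ i : Nat) : Nat) : Int) = some (pvTag i) := by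
  interval_cases i <;> exact ⟨by decide, by decide⟩

theorem pv_keys_bounds : ∀ p ∈ pvBitTagMap, 0 ≤ p.1 ∧ p.1 < 20 := by decide

-- generic fold congruence over any sublist of the table
theorem pv_fold_congr (l : List (Int × String)) (P Q : Int → Bool) (acc : PySem.Set String)
    (h : ∀ p ∈ l, P p.1 = Q p.1) :
    l.foldl (fun tags p => if P p.1 then PySem.Set.add tags p.2 else tags) acc =
      l.foldl (fun tags p => if Q p.1 then PySem.Set.add tags p.2 else tags) acc :=
  PySem.List.foldl_congr_mem _ _ _ _ (fun a p hp => by rw [h p hp])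

-- peeling the selected lowest key i out of a key-sorted fold
theorem pv_star : ∀ (l : List (Int × String)) (P Q : Int → Bool) (i : Int) (t : String)
    (acc : PySem.Set String),
    l.Pairwise (fun p q => p.1 < q.1) →
    (i, t) ∈ l →
    (∀ p ∈ l, p.1 < i → P p.1 = false) →
    (∀ p ∈ l, p.1 < i → Q p.1 = false) →
    (P i = true) → (Q i = false) →
    (∀ p ∈ l, i < p.1 → Q p.1 = P p.1) →
    l.foldl (fun tags p => if P p.1 then PySem.Set.add tags p.2 else tags) acc =
      l.foldl (fun tags p => if Q p.1 then PySem.Set.add tags p.2 else tags) (PySem.Set.add acc t) := by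
  intro l
  induction l with
  | nil => intro P Q i t acc _ hmem _ _ _ _ _; cases hmem
  | cons p tl ih =>
    intro P Q i t acc hpw hmem hPlt hQlt hPi hQi hgt
    have hpw' := (List.pairwise_cons.mp hpw).2
    have hhead := (List.pairwise_cons.mp hpw).1
    rcases lt_trichotomy p.1 i with hc | hc | hc
    · -- head key below i: both sides skip it
      have hne : p ≠ (i, t) := by intro he; rw [he] at hc; exact absurd hc (lt_irrefl i)
      have hmem' : (i, t) ∈ tl := by
        cases hmem with
        | head => exact absurd rfl hne
        | tail _ h => exact h
      simp only [List.foldl_cons, hPlt p (List.mem_cons_self) hc,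
        hQlt p (List.mem_cons_self) hc, if_neg (Bool.false_ne_true)]
      exact ih P Q i t acc hpw' hmem' (fun q hq => hPlt q (List.mem_cons_of_mem p hq))
        (fun q hq => hQlt q (List.mem_cons_of_mem p hq)) hPi hQi
        (fun q hq => hgt q (List.mem_cons_of_mem p hq))
    · -- head key is i: left adds t here, right already carries it
      have hpt : p = (i, t) := by
        cases hmem with
        | head => rfl
        | tail _ h => exact absurd hc (by have := hhead (i, t) h; simp at this; omega)
      simp only [List.foldl_cons, hpt, hPi, hQi, if_neg (Bool.false_ne_true), if_true]
      apply pv_fold_congr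
      intro q hq
      exact (hgt q (List.mem_cons_of_mem p hq) (by
        have := hhead q hq; rw [hpt] at this; exact this)).symm
    · -- head key above i: impossible, the table is sorted and (i, t) is a member
      exfalso
      cases hmem with
      | head => exact absurd hc (by simp)
      | tail _ h => have := hhead (i, t) h; simp at this; omega

-- the isolated lowest set bit, in Nat terms
theorem pv_band_self_neg (M : Nat) (h : 0 < M) :
    PySem.Int.band (M : Int) (-(M : Int)) = ((M - (M &&& (M - 1)) : Nat) : Int) := by
  rw [PySem.Int.band_comm, pv_band_neg_left _ (by omega) M]
  have ht : (-(-(M : Int)) - 1).toNat = M - 1 := by omega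
  rw [ht]

-- bits of M - 2^i (bit i set in M): bit i cleared, everything else unchanged
theorem pv_clear_bit (M i : Nat) (h : M.testBit i = true) (j : Nat) :
    (M - 2 ^ i).testBit j = (M.testBit j && !(decide (i = j))) := by
  have hand : M &&& 2 ^ i = 2 ^ i := by rw [Nat.and_two_pow, h]; simp
  calc (M - 2 ^ i).testBit j = (M - (M &&& 2 ^ i)).testBit j := by rw [hand]
    _ = (M.testBit j && !(2 ^ i).testBit j) := pv_sub_and_testBit j M (2 ^ i)
    _ = (M.testBit j && !(decide (i = j))) := by rw [Nat.testBit_two_pow]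

-- B's loop computes the canonical fold of the table over the bits of M
theorem pv_loop_canon (f : Nat) : ∀ (M : Nat) (acc : PySem.Set String), M < f → M < 2 ^ 20 →
    pvDecodeLoop f (M : Int) acc = pvCanon (fun j => M.testBit j.toNat) acc := by
  induction f with
  | zero => intro M acc h1 _; omega
  | succ f ih =>
    intro M acc h1 h2
    by_cases hM : M = 0
    · subst hM
      simp [pvDecodeLoop, pvCanon, pvBitTagMap, Nat.zero_testBit]
    · have hMpos : 0 < M := Nat.pos_of_ne_zero hM
      obtain ⟨i, hl1, hl2, hl3⟩ := pv_lowbit M hMpos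
      have hi : i < 20 := by
        by_contra hcon
        have hlt : M < 2 ^ i := lt_of_lt_of_le h2 (Nat.pow_le_pow_right (by norm_num) (by omega))
        rw [Nat.testBit_lt_two_pow hlt] at hl2
        exact Bool.false_ne_true hl2
      have hle : 2 ^ i ≤ M := by
        have : M &&& 2 ^ i = 2 ^ i := by rw [Nat.and_two_pow, hl2]; simp
        calc 2 ^ i = M &&& 2 ^ i := this.symm
          _ ≤ M := Nat.and_le_left
      have hlow : PySem.Int.band (M : Int) (-(M : Int)) = ((2 ^ i : Nat) : Int) := by
        rw [pv_band_self_neg M hMpos, hl1]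
      have hQbit : ∀ j, (M - 2 ^ i).testBit j = (M.testBit j && !(decide (i = j))) :=
        pv_clear_bit M i hl2
      have step : pvDecodeLoop (f + 1) (M : Int) acc =
          pvDecodeLoop f (((M - 2 ^ i : Nat) : Int)) (PySem.Set.add acc (pvTag i)) := by
        simp only [pvDecodeLoop]
        rw [if_pos (show (M : Int) ≠ 0 by exact_mod_cast hM)]
        simp only [hlow, (pv_row i hi).2]
        rw [show (M : Int) - ((2 ^ i : Nat) : Int) = ((M - 2 ^ i : Nat) : Int) from
          (Nat.cast_sub hle).symm]
      have h2pos : 0 < 2 ^ i := Nat.two_pow_pos i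
      rw [step, ih (M - 2 ^ i) _ (by omega) (by omega)]
      -- now peel entry i out of the canonical fold
      unfold pvCanon
      symm
      have hP1 : ∀ p ∈ pvBitTagMap, p.1 < (i : Int) → M.testBit p.1.toNat = false := by
        intro p hp hlt
        obtain ⟨hp0, hp20⟩ := pv_keys_bounds p hp
        exact hl3 p.1.toNat (by omega)
      have hQ1 : ∀ p ∈ pvBitTagMap, p.1 < (i : Int) → (M - 2 ^ i).testBit p.1.toNat = false := by
        intro p hp hlt
        obtain ⟨hp0, hp20⟩ := pv_keys_bounds p hp
        rw [hQbit, hl3 p.1.toNat (by omega)]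
        simp
      have hPi : M.testBit ((i : Int)).toNat = true := by simpa using hl2
      have hQi : (M - 2 ^ i).testBit ((i : Int)).toNat = false := by
        rw [hQbit]
        simp
      have hQP : ∀ p ∈ pvBitTagMap, (i : Int) < p.1 →
          (M - 2 ^ i).testBit p.1.toNat = M.testBit p.1.toNat := by
        intro p hp hlt
        obtain ⟨hp0, hp20⟩ := pv_keys_bounds p hp
        rw [hQbit]
        have hne : ¬ (i = p.1.toNat) := by omega
        simp [hne]
      exact pv_star pvBitTagMap (fun j => M.testBit j.toNat) (fun j => (M - 2 ^ i).testBit j.toNat)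
        ((i : Int)) (pvTag i) acc (by decide) ((pv_row i hi).1) hP1 hQ1 hPi hQi hQP

-- B's port equals the canonical fold
theorem pv_alt_eq (bm : Int) :
    decode_supported_tags_bitmask_py_alt bm =
      pvCanon (fun j => (PySem.Int.band bm 1048575).toNat.testBit j.toNat) PySem.Set.empty := by
  obtain ⟨h0, hlt⟩ := pv_masked_bounds bm
  unfold decode_supported_tags_bitmask_py_alt
  rw [show PySem.Int.band bm 1048575 = (((PySem.Int.band bm 1048575).toNat : Nat) : Int) from
    (Int.toNat_of_nonneg h0).symm]
  simp only [Int.toNat_natCast]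
  exact pv_loop_canon _ _ _ (by omega) hlt

-- A's port equals the canonical fold
theorem pv_a_eq (bm : Int) :
    decode_supported_tags_bitmask_py bm =
      pvCanon (fun j => (PySem.Int.band bm 1048575).toNat.testBit j.toNat) PySem.Set.empty := by
  unfold decode_supported_tags_bitmask_py pvCanon
  apply PySem.List.foldl_congr_mem
  intro acc p hp
  obtain ⟨hp0, hp20⟩ := pv_keys_bounds p hp
  have hj : p.1.toNat < 20 := by omega
  by_cases hc : PySem.Int.band bm ((1 : Int) <<< (p.1.toNat : Int)) ≠ 0
  · rw [if_pos hc]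
    beta_reduce
    rw [if_pos ((pv_cond_iff bm p.1.toNat hj).mp hc)]
  · rw [if_neg hc]
    beta_reduce
    rw [if_neg (fun hbt => hc ((pv_cond_iff bm p.1.toNat hj).mpr hbt))]

-- ===== VERDICT (by name: the statement is the Claim_ definition above) =====
theorem decode_supported_tags_bitmask_py_spec : Claim_equal_decode_supported_tags_bitmask_py := by
  intro bitmask _
  unfold Spec_decode_supported_tags_bitmask_py
  rw [pv_a_eq, pv_alt_eq]
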